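-- pv_equiv track=rewrite | github.com/ErickDum/CDMA_encoder_decoder | app/calc/cdma.py | encode_data
-- ===== SOURCE A (Python) =====
-- def encode_data(num_users, data, codes):
--     if num_users > len(codes):
--         return None
--     combinated_signal = [0]*len(codes[0])*len(data[0])
--
--     midpoint = len(codes) // 2
--
--     for i in range(num_users):
--         user_data = data[i]
--         spreading_message = []
--
--         if i % 2 == 0:
--             code_index = midpoint + (i // 2)
--         else:
--             code_index = midpoint - ((i + 1) // 2)
--
--         code = codes[code_index]
--
--         for j in range(len(user_data)):
--             spreading_message.extend([a ^ b for a, b in zip(code, [user_data[j]]*len(codes[0]))])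
--
--         spreading_message_voltage = [1 if x == 0 else -1 for x in spreading_message]
--
--         for j in range(len(spreading_message_voltage)):
--             combinated_signal[j] += spreading_message_voltage[j]
--     return combinated_signal
-- ===== SOURCE B (Python) =====
-- def encode_data(num_users, data, codes):
--     if num_users > len(codes):
--         return None
--     midpoint = len(codes) // 2
--     user_codes = []
--     for i in range(num_users):
--         if i % 2 == 0:
--             user_codes.append(codes[midpoint + i // 2])
--         else:
--             user_codes.append(codes[midpoint - (i + 1) // 2])
--     code_len = len(codes[0])
--     total = code_len * len(data[0])
--     combined = []
--     for j in range(total):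
--         data_index = j // code_len
--         chip = j % code_len
--         s = 0
--         for u in range(num_users):
--             s += 1 if (user_codes[u][chip] ^ data[u][data_index]) == 0 else -1
--         combined.append(s)
--     return combined
-- ===== Notes on version B (the rewrite author's own statement) =====
-- stated objective: alternative
-- what changed: B precomputes the per-user code table once and then builds the combined signal position-by-position (outer loop over output positions, inner sum over users), instead of A's user-by-user construction of full spreading/voltage lists that are then accumulated index-wise into the output.
-- outside the precondition, e.g. on encode_data(2, [[0, 1], [0]], [[0], [1]]): A returns [0, 1], B raises IndexError; on encode_data(2, [[0], [1]], [[0, 1], [1]]): A returns [-2, 1], B raises IndexError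
import Mathlib
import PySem

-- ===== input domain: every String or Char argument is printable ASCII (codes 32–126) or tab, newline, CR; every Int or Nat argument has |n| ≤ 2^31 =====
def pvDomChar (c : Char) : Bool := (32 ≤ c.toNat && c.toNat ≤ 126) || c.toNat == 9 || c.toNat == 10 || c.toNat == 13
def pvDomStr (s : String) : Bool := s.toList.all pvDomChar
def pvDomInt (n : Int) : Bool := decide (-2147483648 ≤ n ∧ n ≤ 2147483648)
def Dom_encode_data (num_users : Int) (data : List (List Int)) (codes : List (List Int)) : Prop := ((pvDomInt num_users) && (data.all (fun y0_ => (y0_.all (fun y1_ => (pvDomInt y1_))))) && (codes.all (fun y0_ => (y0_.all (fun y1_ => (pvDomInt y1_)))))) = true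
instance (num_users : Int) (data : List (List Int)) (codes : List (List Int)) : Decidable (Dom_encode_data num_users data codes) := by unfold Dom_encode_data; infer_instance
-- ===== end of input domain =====

-- B builds the combined signal position-by-position from a precomputed per-user code table,
-- instead of A's user-by-user spreading/voltage lists accumulated into the output (objective: alternative).

-- ===== PORT A =====
def encode_data (num_users : Int) (data : List (List Int)) (codes : List (List Int)) : Option (List Int) :=
  if num_users > (codes.length : Int) then none
  else
    -- [0]*len(codes[0])*len(data[0]) ported as a replicate of the product length — exact
    let code0 := PySem.List.pyGetD codes 0 []
    let data0 := PySem.List.pyGetD data 0 []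
    let combinated_signal : List Int := List.replicate (code0.length * data0.length) 0
    let midpoint : Int := PySem.Int.floordiv (codes.length : Int) 2
    some ((PySem.List.pyRange 0 num_users 1).foldl (fun combinated_signal i =>
      let user_data := PySem.List.pyGetD data i []
      let code_index : Int :=
        if PySem.Int.mod i 2 = 0 then midpoint + PySem.Int.floordiv i 2
        else midpoint - PySem.Int.floordiv (i + 1) 2
      let code := PySem.List.pyGetD codes code_index []
      let spreading_message : List Int :=
        (PySem.List.pyRange 0 (user_data.length : Int) 1).foldl (fun acc j =>
          acc ++ (code.zip (List.replicate code0.length (PySem.List.pyGetD user_data j 0))).map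
                   (fun p => PySem.Int.bxor p.1 p.2)) []
      let spreading_message_voltage := spreading_message.map (fun x => if x = 0 then (1 : Int) else -1)
      (PySem.List.pyRange 0 (spreading_message_voltage.length : Int) 1).foldl (fun c j =>
        PySem.List.pySetD c j (PySem.List.pyGetD c j 0 + PySem.List.pyGetD spreading_message_voltage j 0))
        combinated_signal) combinated_signal)

-- ===== PORT B =====
def encode_data_alt (num_users : Int) (data : List (List Int)) (codes : List (List Int)) : Option (List Int) :=
  if num_users > (codes.length : Int) then none
  else
    let midpoint : Int := PySem.Int.floordiv (codes.length : Int) 2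
    let user_codes : List (List Int) := (PySem.List.pyRange 0 num_users 1).map (fun i =>
      if PySem.Int.mod i 2 = 0 then PySem.List.pyGetD codes (midpoint + PySem.Int.floordiv i 2) []
      else PySem.List.pyGetD codes (midpoint - PySem.Int.floordiv (i + 1) 2) [])
    let code_len : Int := ((PySem.List.pyGetD codes 0 []).length : Int)
    let total : Int := code_len * ((PySem.List.pyGetD data 0 []).length : Int)
    some ((PySem.List.pyRange 0 total 1).map (fun j =>
      let data_index := PySem.Int.floordiv j code_len
      let chip := PySem.Int.mod j code_len
      (PySem.List.pyRange 0 num_users 1).foldl (fun s u =>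
        s + (if PySem.Int.bxor (PySem.List.pyGetD (PySem.List.pyGetD user_codes u []) chip 0)
                               (PySem.List.pyGetD (PySem.List.pyGetD data u []) data_index 0) = 0
             then (1 : Int) else -1)) 0))

-- ===== PRECONDITION & SPEC =====
-- Pre_ excludes: empty codes/data (A raises IndexError at codes[0]/data[0]), num_users > len(data)
-- with 0 < num_users ≤ len(codes) (A raises IndexError at data[i]), and ragged (non-rectangular)
-- codes/data rows, where A's zip-truncation silently drops chips while B indexes those rows and raises.
def Pre_encode_data (num_users : Int) (data : List (List Int)) (codes : List (List Int)) : Prop :=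
  (codes.length : Int) < num_users ∨
  (codes ≠ [] ∧ data ≠ [] ∧
    (num_users ≤ 0 ∨
      (num_users ≤ (data.length : Int) ∧
       (∀ c ∈ codes, c.length = codes.headI.length) ∧
       (∀ d ∈ data, d.length = data.headI.length))))
instance (num_users : Int) (data : List (List Int)) (codes : List (List Int)) : Decidable (Pre_encode_data num_users data codes) := by unfold Pre_encode_data; infer_instance

def pvWitness_encode_data : Int × List (List Int) × List (List Int) :=
  (2, [[0, 1], [1, 0]], [[0, 0], [0, 1]])

def Spec_encode_data (num_users : Int) (data : List (List Int)) (codes : List (List Int)) (out : Option (List Int)) : Prop := out = encode_data_alt num_users data codes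
instance (num_users : Int) (data : List (List Int)) (codes : List (List Int)) (out : Option (List Int)) : Decidable (Spec_encode_data num_users data codes out) := by unfold Spec_encode_data; infer_instance

-- ===== CLAIM (what is proved, stated in full; the proofs are below) =====
def Claim_equal_encode_data : Prop := ∀ (num_users : Int) (data : List (List Int)) (codes : List (List Int)), Dom_encode_data num_users data codes → Pre_encode_data num_users data codes → Spec_encode_data num_users data codes (encode_data num_users data codes)

-- ===== LEMMAS AND PROOFS =====

theorem zip_replicate_self (l : List Int) (x : Int) :
    l.zip (List.replicate l.length x) = l.map (fun a => (a, x)) := by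
  induction l with
  | nil => rfl
  | cons a t ih => simp [List.replicate_succ, ih]

theorem length_flatMap_range (f : Nat → List Int) (L n : Nat) (hf : ∀ j, (f j).length = L) :
    ((List.range n).flatMap f).length = n * L := by
  induction n with
  | zero => simp
  | succ m ih => simp [List.range_succ, ih, hf]; ring

theorem getD_flatMap_range (f : Nat → List Int) (L n k : Nat) (hf : ∀ j, (f j).length = L)
    (hk : k < n * L) :
    ((List.range n).flatMap f).getD k 0 = (f (k / L)).getD (k % L) 0 := by
  induction n with
  | zero => omega
  | succ m ih =>
    rw [List.range_succ, List.flatMap_append]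
    by_cases h : k < m * L
    · rw [List.getD_append _ _ _ _ (by rw [length_flatMap_range f L m hf]; exact h)]
      exact ih h
    · rw [Nat.succ_mul] at hk
      have hdiv : k / L = m := Nat.div_eq_of_lt_le (by omega) (by rw [Nat.succ_mul]; omega)
      have hmod : k % L = k - m * L := by
        have h2 : L * (k / L) + k % L = k := Nat.div_add_mod k L
        rw [hdiv, Nat.mul_comm] at h2; omega
      rw [List.getD_append_right _ _ _ _ (by rw [length_flatMap_range f L m hf]; omega)]
      rw [length_flatMap_range f L m hf, hdiv, hmod]
      simp

theorem take_succ_getD (c : List Int) (m : Nat) (hm : m < c.length) :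
    c.take (m + 1) = c.take m ++ [c.getD m 0] := by
  rw [List.take_succ, List.getElem?_eq_getElem hm, List.getD_eq_getElem _ _ hm]
  rfl

theorem addInto_aux (v c : List Int) (m : Nat) (hm : m ≤ v.length) (hv : v.length = c.length) :
    (PySem.List.pyRange 0 (m : Int) 1).foldl
      (fun cc j => PySem.List.pySetD cc j (PySem.List.pyGetD cc j 0 + PySem.List.pyGetD v j 0)) c
    = List.zipWith (· + ·) (c.take m) (v.take m) ++ c.drop m := by
  induction m with
  | zero => simp [PySem.List.pyRange_one_eq_nil]
  | succ m ih =>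
    have hcast : ((m + 1 : Nat) : Int) = (m : Int) + 1 := by push_cast; ring
    rw [hcast, PySem.List.pyRange_one_succ_right (by positivity), List.foldl_append]
    rw [ih (by omega)]
    have hm' : m < c.length := by omega
    have hmv : m < v.length := by omega
    have hlen1 : (List.zipWith (· + ·) (c.take m) (v.take m)).length = m := by
      simp; omega
    have hgetc : PySem.List.pyGetD (List.zipWith (· + ·) (c.take m) (v.take m) ++ c.drop m) (m : Int) 0 = c.getD m 0 := by
      rw [PySem.List.pyGetD_natCast]
      rw [List.getD_append_right _ _ _ _ (by omega)]
      rw [hlen1]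
      simp [List.getD, List.getElem?_drop]
    have hgetv : PySem.List.pyGetD v (m : Int) 0 = v.getD m 0 := PySem.List.pyGetD_natCast ..
    simp only [List.foldl_cons, List.foldl_nil, hgetc, hgetv, PySem.List.pySetD_natCast]
    rw [List.set_append_right _ _ (by omega), hlen1]
    have hdrop : c.drop m = c.getD m 0 :: c.drop (m + 1) := by
      rw [List.drop_eq_getElem_cons hm', List.getD_eq_getElem _ _ hm']
    rw [hdrop]
    simp only [Nat.sub_self, List.set_cons_zero]
    rw [take_succ_getD c m hm', take_succ_getD v m hmv]
    rw [List.zipWith_append (h := by simp; omega)]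
    simp

theorem foldl_addInto_eq_zipWith (volt : Int → List Int) (users : List Int) (c0 : List Int) (T : Nat)
    (h0 : c0.length = T) (hv : ∀ i ∈ users, (volt i).length = T) :
    users.foldl (fun c i => (PySem.List.pyRange 0 ((volt i).length : Int) 1).foldl
      (fun cc j => PySem.List.pySetD cc j (PySem.List.pyGetD cc j 0 + PySem.List.pyGetD (volt i) j 0)) c) c0
    = users.foldl (fun c i => List.zipWith (· + ·) c (volt i)) c0 := by
  induction users generalizing c0 with
  | nil => rfl
  | cons i us ih =>
    simp only [List.foldl_cons]
    have hvi : (volt i).length = T := hv i (by simp)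
    rw [addInto_aux (volt i) c0 (volt i).length le_rfl (by omega)]
    rw [List.take_length, List.take_of_length_le (by omega), List.drop_of_length_le (by omega),
        List.append_nil]
    exact ih _ (by simp; omega) (fun x hx => hv x (by simp [hx]))

theorem foldl_zipWith_length (volt : Int → List Int) (users : List Int) (c0 : List Int) (T : Nat)
    (h0 : c0.length = T) (hv : ∀ i ∈ users, (volt i).length = T) :
    (users.foldl (fun c i => List.zipWith (· + ·) c (volt i)) c0).length = T := by
  induction users generalizing c0 with
  | nil => exact h0
  | cons i us ih =>
    simp only [List.foldl_cons]
    exact ih _ (by simp [h0, hv i (by simp)]) (fun x hx => hv x (by simp [hx]))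

theorem foldl_zipWith_getD (volt : Int → List Int) (users : List Int) (c0 : List Int) (T k : Nat)
    (h0 : c0.length = T) (hv : ∀ i ∈ users, (volt i).length = T) (hk : k < T) :
    (users.foldl (fun c i => List.zipWith (· + ·) c (volt i)) c0).getD k 0
    = users.foldl (fun s i => s + (volt i).getD k 0) (c0.getD k 0) := by
  induction users generalizing c0 with
  | nil => rfl
  | cons i us ih =>
    simp only [List.foldl_cons]
    have hvi : (volt i).length = T := hv i (by simp)
    rw [ih _ (by simp [h0, hvi]) (fun x hx => hv x (by simp [hx]))]
    congr 1
    rw [List.getD_eq_getElem _ _ (by simp [h0, hvi]; omega)]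
    rw [List.getElem_zipWith]
    rw [List.getD_eq_getElem _ _ (by omega), List.getD_eq_getElem _ _ (by omega)]

theorem foldl_add_congr (users : List Int) (f g : Int → Int) (s0 : Int)
    (h : ∀ i ∈ users, f i = g i) :
    users.foldl (fun s i => s + f i) s0 = users.foldl (fun s i => s + g i) s0 := by
  induction users generalizing s0 with
  | nil => rfl
  | cons i us ih =>
    simp only [List.foldl_cons]
    rw [h i (by simp), ih _ (fun x hx => h x (by simp [hx]))]

def cIdx (n : Nat) (i : Int) : Int :=
  if PySem.Int.mod i 2 = 0 then PySem.Int.floordiv (n : Int) 2 + PySem.Int.floordiv i 2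
  else PySem.Int.floordiv (n : Int) 2 - PySem.Int.floordiv (i + 1) 2

theorem cIdx_bounds (n : Nat) (i : Int) (h0 : 0 ≤ i) (h1 : i < (n : Int)) :
    0 ≤ cIdx n i ∧ cIdx n i < (n : Int) := by
  unfold cIdx
  rw [PySem.Int.mod_eq_emod_of_pos (by norm_num), PySem.Int.floordiv_eq_ediv_of_pos (by norm_num : (0:Int) < 2) (a := (n : Int)),
      PySem.Int.floordiv_eq_ediv_of_pos (by norm_num : (0:Int) < 2) (a := i),
      PySem.Int.floordiv_eq_ediv_of_pos (by norm_num : (0:Int) < 2) (a := i + 1)]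
  split_ifs with h <;> omega

def voltA (data codes : List (List Int)) (i : Int) : List Int :=
  let user_data := PySem.List.pyGetD data i []
  let code := PySem.List.pyGetD codes (cIdx codes.length i) []
  let spreading_message : List Int :=
    (PySem.List.pyRange 0 (user_data.length : Int) 1).foldl (fun acc j =>
      acc ++ (code.zip (List.replicate (PySem.List.pyGetD codes 0 []).length
                (PySem.List.pyGetD user_data j 0))).map
               (fun p => PySem.Int.bxor p.1 p.2)) []
  spreading_message.map (fun x => if x = 0 then (1 : Int) else -1)

theorem getD_map_of_lt (f : Int → Int) (l : List Int) (k : Nat) (h : k < l.length) (d d' : Int) :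
    (l.map f).getD k d = f (l.getD k d') := by
  rw [List.getD_eq_getElem _ _ (by simpa), List.getElem_map, List.getD_eq_getElem _ _ h]

theorem voltA_spec (data codes : List (List Int)) (L D : Nat) (i : Int)
    (hcl : ∀ c ∈ codes, c.length = L)
    (hc0 : (PySem.List.pyGetD codes 0 []).length = L)
    (h0 : 0 ≤ i) (h1 : i < (codes.length : Int))
    (hud : (PySem.List.pyGetD data i []).length = D) :
    (voltA data codes i).length = D * L ∧
    ∀ k : Nat, k < D * L →
      (voltA data codes i).getD k 0 =
        if PySem.Int.bxor ((PySem.List.pyGetD codes (cIdx codes.length i) []).getD (k % L) 0)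
                          ((PySem.List.pyGetD data i []).getD (k / L) 0) = 0
        then (1 : Int) else -1 := by
  have hidx := cIdx_bounds codes.length i h0 h1
  have hcode : (PySem.List.pyGetD codes (cIdx codes.length i) []).length = L :=
    hcl _ (PySem.List.pyGetD_mem codes [] (by simp [PySem.Raise.InRange]; omega))
  unfold voltA
  simp only []
  set ud := PySem.List.pyGetD data i [] with hudx
  set code := PySem.List.pyGetD codes (cIdx codes.length i) [] with hcodex
  have hchunk : ∀ x : Int,
      (code.zip (List.replicate (PySem.List.pyGetD codes 0 []).length x)).map
        (fun p => PySem.Int.bxor p.1 p.2)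
      = code.map (fun a => PySem.Int.bxor a x) := by
    intro x
    rw [hc0, ← hcode, zip_replicate_self, List.map_map]
    rfl
  have hspr :
      (PySem.List.pyRange 0 (ud.length : Int) 1).foldl (fun acc j =>
        acc ++ (code.zip (List.replicate (PySem.List.pyGetD codes 0 []).length
                  (PySem.List.pyGetD ud j 0))).map
                 (fun p => PySem.Int.bxor p.1 p.2)) []
      = (List.range D).flatMap (fun j => code.map (fun a => PySem.Int.bxor a (ud.getD j 0))) := by
    rw [PySem.List.foldl_append_eq_flatMap, List.nil_append, hud, PySem.List.pyRange_one,
        List.flatMap_map]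
    simp only [PySem.List.pyGetD_natCast, zero_add]
    congr 1
    funext j
    exact hchunk _
  rw [hspr]
  have hf : ∀ j, ((fun j => code.map (fun a => PySem.Int.bxor a (ud.getD j 0))) j).length = L := by
    intro j; simp [hcode]
  have hlen : ((List.range D).flatMap (fun j => code.map (fun a => PySem.Int.bxor a (ud.getD j 0)))).length = D * L :=
    length_flatMap_range _ L D hf
  constructor
  · rw [List.length_map, hlen]
  · intro k hk
    have hL : 0 < L := by
      rcases Nat.eq_zero_or_pos L with h | h
      · subst h; omega
      · exact h
    rw [getD_map_of_lt _ _ _ (by rw [hlen]; exact hk) 0 0]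
    rw [getD_flatMap_range _ L D k hf hk]
    rw [getD_map_of_lt _ _ _ (by rw [hcode]; exact Nat.mod_lt _ hL) 0 0]

def bUserCodes (nu : Int) (codes : List (List Int)) : List (List Int) :=
  (PySem.List.pyRange 0 nu 1).map (fun i =>
    if PySem.Int.mod i 2 = 0 then
      PySem.List.pyGetD codes (PySem.Int.floordiv (codes.length : Int) 2 + PySem.Int.floordiv i 2) []
    else
      PySem.List.pyGetD codes (PySem.Int.floordiv (codes.length : Int) 2 - PySem.Int.floordiv (i + 1) 2) [])

theorem encode_data_eq (nu : Int) (data codes : List (List Int)) (h : ¬ nu > (codes.length : Int)) :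
    encode_data nu data codes = some ((PySem.List.pyRange 0 nu 1).foldl
      (fun c i => (PySem.List.pyRange 0 ((voltA data codes i).length : Int) 1).foldl
        (fun cc j => PySem.List.pySetD cc j (PySem.List.pyGetD cc j 0 + PySem.List.pyGetD (voltA data codes i) j 0)) c)
      (List.replicate ((PySem.List.pyGetD codes 0 []).length * (PySem.List.pyGetD data 0 []).length) 0)) := by
  rw [encode_data, if_neg h]
  rfl

theorem encode_data_alt_eq (nu : Int) (data codes : List (List Int)) (h : ¬ nu > (codes.length : Int)) :
    encode_data_alt nu data codes = some ((PySem.List.pyRange 0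
        (((PySem.List.pyGetD codes 0 []).length : Int) * ((PySem.List.pyGetD data 0 []).length : Int)) 1).map (fun j =>
      (PySem.List.pyRange 0 nu 1).foldl (fun s u =>
        s + (if PySem.Int.bxor
               (PySem.List.pyGetD (PySem.List.pyGetD (bUserCodes nu codes) u [])
                 (PySem.Int.mod j ((PySem.List.pyGetD codes 0 []).length : Int)) 0)
               (PySem.List.pyGetD (PySem.List.pyGetD data u [])
                 (PySem.Int.floordiv j ((PySem.List.pyGetD codes 0 []).length : Int)) 0) = 0
             then (1 : Int) else -1)) 0)) := by
  rw [encode_data_alt, if_neg h]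
  rfl

theorem list_eq_of_getD (a b : List Int) (hlen : a.length = b.length)
    (h : ∀ k, k < a.length → a.getD k 0 = b.getD k 0) : a = b := by
  apply List.ext_getElem hlen
  intro k h1 h2
  have := h k h1
  rwa [List.getD_eq_getElem _ _ h1, List.getD_eq_getElem _ _ h2] at this

-- ===== VERDICT (by name: the statement is the Claim_ definition above) =====
theorem encode_data_spec : Claim_equal_encode_data := by
  intro nu data codes _ hpre
  unfold Spec_encode_data
  by_cases hgt : nu > (codes.length : Int)
  · rw [encode_data, encode_data_alt, if_pos hgt, if_pos hgt]
  · rcases hpre with hlt | ⟨hc, hd, hrest⟩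
    · exact absurd hlt hgt
    obtain ⟨c0, cs, rfl⟩ := List.exists_cons_of_ne_nil hc
    obtain ⟨d0, ds, rfl⟩ := List.exists_cons_of_ne_nil hd
    have hc0get : PySem.List.pyGetD (c0 :: cs) 0 ([] : List Int) = c0 := PySem.List.pyGetD_zero_cons ..
    have hd0get : PySem.List.pyGetD (d0 :: ds) 0 ([] : List Int) = d0 := PySem.List.pyGetD_zero_cons ..
    rw [encode_data_eq _ _ _ hgt, encode_data_alt_eq _ _ _ hgt, hc0get, hd0get]
    rcases hrest with hle | ⟨hnd, hrc, hrd⟩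
    · -- num_users ≤ 0: no user is processed; both results are all zeros
      rw [PySem.List.pyRange_one_eq_nil hle]
      simp only [List.foldl_nil]
      congr 1
      rw [List.map_const', PySem.List.length_pyRange_one]
      simp only [Int.sub_zero]
      rw [← Nat.cast_mul, Int.toNat_natCast]
    · have hcl : ∀ c ∈ c0 :: cs, c.length = c0.length := by simpa using hrc
      have hdl : ∀ d ∈ d0 :: ds, d.length = d0.length := by simpa using hrd
      have hnu_le : nu ≤ ((c0 :: cs).length : Int) := not_lt.mp hgt
      have hud_len : ∀ i : Int, 0 ≤ i → i < nu →
          (PySem.List.pyGetD (d0 :: ds) i ([] : List Int)).length = d0.length := by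
        intro i h0 h1
        have hnd' : nu ≤ (ds.length : Int) + 1 := by simpa using hnd
        exact hdl _ (PySem.List.pyGetD_mem (d0 :: ds) [] (by simp [PySem.Raise.InRange]; omega))
      have hvolt : ∀ i : Int, 0 ≤ i → i < nu →
          (voltA (d0 :: ds) (c0 :: cs) i).length = d0.length * c0.length ∧
          ∀ k : Nat, k < d0.length * c0.length →
            (voltA (d0 :: ds) (c0 :: cs) i).getD k 0 =
              if PySem.Int.bxor
                   ((PySem.List.pyGetD (c0 :: cs) (cIdx (c0 :: cs).length i) []).getD (k % c0.length) 0)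
                   ((PySem.List.pyGetD (d0 :: ds) i []).getD (k / c0.length) 0) = 0
              then (1 : Int) else -1 := by
        intro i h0 h1
        exact voltA_spec (d0 :: ds) (c0 :: cs) c0.length d0.length i hcl (by rw [hc0get]) h0
          (by omega) (hud_len i h0 h1)
      have hv : ∀ i ∈ PySem.List.pyRange 0 nu 1,
          (voltA (d0 :: ds) (c0 :: cs) i).length = c0.length * d0.length := by
        intro i hi
        rw [PySem.List.mem_pyRange_one] at hi
        rw [(hvolt i hi.1 hi.2).1, Nat.mul_comm]
      congr 1
      rw [foldl_addInto_eq_zipWith _ _ _ (c0.length * d0.length) (by simp) hv]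
      apply list_eq_of_getD
      · rw [foldl_zipWith_length _ _ _ (c0.length * d0.length) (by simp) hv]
        rw [List.length_map, PySem.List.length_pyRange_one]
        simp only [Int.sub_zero]
        rw [← Nat.cast_mul, Int.toNat_natCast]
      · intro k hk
        rw [foldl_zipWith_length _ _ _ (c0.length * d0.length) (by simp) hv] at hk
        rw [foldl_zipWith_getD _ _ _ (c0.length * d0.length) k (by simp) hv hk]
        rw [← PySem.List.pyGetD_natCast ((PySem.List.pyRange 0 _ 1).map _) k 0]
        rw [← Nat.cast_mul, PySem.List.pyGetD_map_pyRange _ _ k 0 hk]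
        simp only [PySem.Int.mod_natCast, PySem.Int.floordiv_natCast, PySem.List.pyGetD_natCast]
        rw [List.getD_replicate]
        apply foldl_add_congr
        intro i hi
        rw [PySem.List.mem_pyRange_one] at hi
        rw [(hvolt i hi.1 hi.2).2 k (by rw [Nat.mul_comm]; exact hk)]
        have huc : PySem.List.pyGetD (bUserCodes nu (c0 :: cs)) i ([] : List Int)
            = PySem.List.pyGetD (c0 :: cs) (cIdx (c0 :: cs).length i) [] := by
          unfold bUserCodes
          rw [PySem.List.pyGetD_map_pyRange_of_nonneg _ _ _ _ hi.1 hi.2]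
          exact (apply_ite (fun t => PySem.List.pyGetD (c0 :: cs) t ([] : List Int)) _ _ _).symm
        rw [huc]
        exact hk
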